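-- pv_equiv track=rewrite | github.com/NablaChem/nablachem | tests/test_space.py | _compare_caselists
-- ===== SOURCE A (Python) =====
-- def _compare_caselists(actual, expected):
--     # sorting within one case does not matter, sorting of cases does,
--     # but only between None separators which indicate a new degree sequence starting
--     if len(actual) != len(expected):
--         return False
--
--     def _to_blocks(caselist):
--         blocks = []
--         block = []
--         for entry in caselist:
--             if entry is None:
--                 blocks.append(set(block))
--                 block = []
--             else:
--                 block.append(tuple(sorted(entry)))
--         blocks.append(set(block))
--         return blocks
--
--     blocks_actual = _to_blocks(actual)
--     blocks_expected = _to_blocks(expected)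
--     if len(blocks_actual) != len(blocks_expected):
--         return False
--
--     for block in blocks_expected:
--         index = blocks_actual.index(block)
--         del blocks_actual[index]
--     return True
-- ===== SOURCE B (Python) =====
-- def _compare_caselists(actual, expected):
--     if len(actual) != len(expected):
--         return False
--
--     def _canon(caselist):
--         blocks = []
--         block = []
--         for entry in caselist:
--             if entry is None:
--                 blocks.append(sorted(set(block)))
--                 block = []
--             else:
--                 block.append(tuple(sorted(entry)))
--         blocks.append(sorted(set(block)))
--         return sorted(blocks)
--
--     return _canon(actual) == _canon(expected)
-- ===== Notes on version B (the rewrite author's own statement) =====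
-- stated objective: alternative
-- what changed: The repeated list.index/del multiset matching over blocks is replaced by canonicalizing each block to a sorted list and comparing the two sorted lists of canonical blocks (sort-then-compare); Pre_ excludes exactly the inputs where A raises ValueError (equal lengths and block counts, differing block multisets), where B returns False.
import Mathlib
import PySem

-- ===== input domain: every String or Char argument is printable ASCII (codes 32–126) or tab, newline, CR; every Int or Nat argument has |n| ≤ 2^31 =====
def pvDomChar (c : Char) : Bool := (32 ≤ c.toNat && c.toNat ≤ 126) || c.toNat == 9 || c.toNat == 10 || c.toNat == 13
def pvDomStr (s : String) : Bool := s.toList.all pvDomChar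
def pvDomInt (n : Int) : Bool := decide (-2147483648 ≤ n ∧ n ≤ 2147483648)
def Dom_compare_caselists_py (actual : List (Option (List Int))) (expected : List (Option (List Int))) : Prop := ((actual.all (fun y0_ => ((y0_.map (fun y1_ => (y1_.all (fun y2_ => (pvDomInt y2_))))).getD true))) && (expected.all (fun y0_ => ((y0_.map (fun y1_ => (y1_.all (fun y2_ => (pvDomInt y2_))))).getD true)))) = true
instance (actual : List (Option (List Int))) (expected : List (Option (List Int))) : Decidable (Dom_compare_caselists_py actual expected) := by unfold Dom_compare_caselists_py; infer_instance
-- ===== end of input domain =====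

-- B replaces A's repeated list.index/del multiset matching over blocks by canonicalizing each
-- block to a sorted list and comparing the two sorted lists of canonical blocks (sort-then-compare).


-- ===== PORT A =====
-- tuple(sorted(entry))
def pvSortEntry (e : List Int) : List Int := PySem.List.sorted e (fun x => x) false

-- one iteration of A's 'for entry in caselist' loop over the state (blocks, block)
def pvStepA (st : List (PySem.Set (List Int)) × List (List Int)) (entry : Option (List Int)) :
    List (PySem.Set (List Int)) × List (List Int) :=
  match entry with
  | none => (st.1 ++ [PySem.Set.ofList st.2], ([] : List (List Int)))
  | some e => (st.1, st.2 ++ [pvSortEntry e])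

-- A's _to_blocks: the loop, then the final blocks.append(set(block))
def pvToBlocksA (caselist : List (Option (List Int))) : List (PySem.Set (List Int)) :=
  let st := caselist.foldl pvStepA ([], [])
  st.1 ++ [PySem.Set.ofList st.2]

-- blocks_actual.index(block): first index whose element equals block AS A SET (Python set ==)
def pvIndexSetEq (ba : List (PySem.Set (List Int))) (b : PySem.Set (List Int)) : Option Nat :=
  ba.findIdx? (fun s => PySem.Set.equal s b)

-- 'for block in blocks_expected: index = blocks_actual.index(block); del blocks_actual[index]'
def pvRemoveLoop : List (PySem.Set (List Int)) → List (PySem.Set (List Int)) → Bool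
  | [], _ => true
  | b :: rest, ba =>
    match pvIndexSetEq ba b with
    | some i => pvRemoveLoop rest (ba.eraseIdx i)
    | none => false   -- ValueError in Python; excluded by Pre_

def compare_caselists_py (actual : List (Option (List Int))) (expected : List (Option (List Int))) : Bool :=
  if actual.length ≠ expected.length then false
  else
    let blocks_actual := pvToBlocksA actual
    let blocks_expected := pvToBlocksA expected
    if blocks_actual.length ≠ blocks_expected.length then false
    else pvRemoveLoop blocks_expected blocks_actual

-- ===== PORT B =====
-- one iteration of B's identical block-building loop, but each finished block is stored canonically
-- as sorted(set(block))
def pvStepB (st : List (List (List Int)) × List (List Int)) (entry : Option (List Int)) :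
    List (List (List Int)) × List (List Int) :=
  match entry with
  | none => (st.1 ++ [PySem.List.sorted (PySem.Set.ofList st.2) (fun x => x) false], ([] : List (List Int)))
  | some e => (st.1, st.2 ++ [pvSortEntry e])

-- B's _canon: the loop, the final append, then sorted(blocks)
def pvCanonB (caselist : List (Option (List Int))) : List (List (List Int)) :=
  let st := caselist.foldl pvStepB ([], [])
  PySem.List.sorted (st.1 ++ [PySem.List.sorted (PySem.Set.ofList st.2) (fun x => x) false]) (fun x => x) false

def compare_caselists_py_alt (actual : List (Option (List Int))) (expected : List (Option (List Int))) : Bool :=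
  if actual.length ≠ expected.length then false
  else decide (pvCanonB actual = pvCanonB expected)

-- ===== PRECONDITION & SPEC =====
-- canonical form of one block (a set of entries, written as its sorted list)
def pvCanonKey (b : List (List Int)) : List (List Int) :=
  PySem.List.sorted (PySem.Set.ofList b) (fun x => x) false

-- the canonical blocks of a caselist, by structural recursion on the caselist
def pvPreBlocks : List (Option (List Int)) → List (List Int) → List (List (List Int))
  | [], cur => [pvCanonKey cur]
  | none :: t, cur => pvCanonKey cur :: pvPreBlocks t []
  | some e :: t, cur => pvPreBlocks t (cur ++ [PySem.List.sorted e (fun x => x) false])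

-- Pre_ excludes exactly the inputs on which A raises ValueError (list.index misses): equal list
-- lengths and equal block counts but block multisets that differ; A returns on everything else.
def Pre_compare_caselists_py (actual : List (Option (List Int))) (expected : List (Option (List Int))) : Prop :=
  actual.length = expected.length →
  (pvPreBlocks actual []).length = (pvPreBlocks expected []).length →
  (pvPreBlocks actual []).Perm (pvPreBlocks expected [])

instance (actual : List (Option (List Int))) (expected : List (Option (List Int))) : Decidable (Pre_compare_caselists_py actual expected) := by unfold Pre_compare_caselists_py; infer_instance

def pvWitness_compare_caselists_py : List (Option (List Int)) × List (Option (List Int)) :=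
  ([some [2, 1], none, some [3]], [some [1, 2], none, some [3]])

def Spec_compare_caselists_py (actual : List (Option (List Int))) (expected : List (Option (List Int))) (out : Bool) : Prop := out = compare_caselists_py_alt actual expected
instance (actual : List (Option (List Int))) (expected : List (Option (List Int))) (out : Bool) : Decidable (Spec_compare_caselists_py actual expected out) := by unfold Spec_compare_caselists_py; infer_instance

-- ===== CLAIM (what is proved, stated in full; the proofs are below) =====
def Claim_equal_compare_caselists_py : Prop := ∀ (actual : List (Option (List Int))) (expected : List (Option (List Int))), Dom_compare_caselists_py actual expected → Pre_compare_caselists_py actual expected → Spec_compare_caselists_py actual expected (compare_caselists_py actual expected)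

-- ===== LEMMAS AND PROOFS =====

-- the canonical key of a block-as-set
def pvKey (s : PySem.Set (List Int)) : List (List Int) := PySem.List.sorted s (fun x => x) false

lemma pvKey_ofList (b : List (List Int)) : pvKey (PySem.Set.ofList b) = pvCanonKey b := rfl

-- B's fold tracks A's fold through pvKey
lemma pvFoldB_eq (l : List (Option (List Int))) (acc : List (PySem.Set (List Int))) (cur : List (List Int)) :
    l.foldl pvStepB (acc.map pvKey, cur) = ((l.foldl pvStepA (acc, cur)).1.map pvKey, (l.foldl pvStepA (acc, cur)).2) := by
  induction l generalizing acc cur with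
  | nil => simp
  | cons h t ih =>
    cases h with
    | none =>
      have hstep : pvStepB (acc.map pvKey, cur) none = ((acc ++ [PySem.Set.ofList cur]).map pvKey, ([] : List (List Int))) := by
        simp [pvStepB, pvKey]
      simp only [List.foldl_cons, hstep, ih, pvStepA]
    | some e =>
      simpa [pvStepB, pvStepA] using ih acc (cur ++ [pvSortEntry e])

lemma pvCanonB_eq (l : List (Option (List Int))) :
    pvCanonB l = PySem.List.sorted ((pvToBlocksA l).map pvKey) (fun x => x) false := by
  unfold pvCanonB pvToBlocksA
  have h := pvFoldB_eq l [] []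
  simp only [List.map_nil] at h
  rw [h]
  simp [pvKey]

-- pvPreBlocks is the canonical image of A's blocks
lemma pvPreBlocks_eq_aux (l : List (Option (List Int))) (acc : List (PySem.Set (List Int))) (cur : List (List Int)) :
    acc.map pvKey ++ pvPreBlocks l cur
      = ((l.foldl pvStepA (acc, cur)).1 ++ [PySem.Set.ofList (l.foldl pvStepA (acc, cur)).2]).map pvKey := by
  induction l generalizing acc cur with
  | nil => simp [pvPreBlocks, ← pvKey_ofList]
  | cons h t ih =>
    cases h with
    | none =>
      have h2 := ih (acc ++ [PySem.Set.ofList cur]) []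
      simp only [List.map_append, List.map_cons, List.map_nil] at h2
      simpa [pvPreBlocks, pvStepA, ← pvKey_ofList] using h2
    | some e =>
      simpa [pvPreBlocks, pvStepA, pvSortEntry] using ih acc (cur ++ [PySem.List.sorted e (fun x => x) false])

lemma pvPreBlocks_eq (l : List (Option (List Int))) :
    pvPreBlocks l [] = (pvToBlocksA l).map pvKey := by
  have h := pvPreBlocks_eq_aux l [] []
  simpa [pvToBlocksA] using h

-- every block produced by A's _to_blocks is a genuine set (Nodup)
lemma pvToBlocksA_nodup_aux (l : List (Option (List Int))) (acc : List (PySem.Set (List Int))) (cur : List (List Int))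
    (hacc : ∀ s ∈ acc, s.Nodup) :
    (∀ s ∈ (l.foldl pvStepA (acc, cur)).1, s.Nodup) := by
  induction l generalizing acc cur with
  | nil => simpa using hacc
  | cons h t ih =>
    cases h with
    | none =>
      refine ih (acc ++ [PySem.Set.ofList cur]) [] ?_
      intro s hs
      rcases List.mem_append.mp hs with h1 | h1
      · exact hacc s h1
      · simp only [List.mem_singleton] at h1; subst h1; exact PySem.Set.nodup_ofList cur
    | some e => exact ih acc (cur ++ [pvSortEntry e]) hacc

lemma pvToBlocksA_nodup (l : List (Option (List Int))) : ∀ s ∈ pvToBlocksA l, s.Nodup := by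
  intro s hs
  unfold pvToBlocksA at hs
  rcases List.mem_append.mp hs with h1 | h1
  · exact pvToBlocksA_nodup_aux l [] [] (by simp) s h1
  · simp only [List.mem_singleton] at h1; subst h1; exact PySem.Set.nodup_ofList _

-- for Nodup lists, Python set equality is equality of canonical keys
-- sorted does not depend on which (defeq) LT/Decidable instances elaboration picked
lemma pvSortedCongrInst {α κ : Type} {i1 i2 : LT κ} (h : i1 = i2)
    (d1 : @DecidableRel κ κ (@LT.lt κ i1)) (d2 : @DecidableRel κ κ (@LT.lt κ i2))
    (xs : List α) (key : α → κ) (r : Bool) :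
    @PySem.List.sorted α κ i1 d1 xs key r = @PySem.List.sorted α κ i2 d2 xs key r := by
  subst h
  congr 1

lemma pvKey_eq_iff (s t : PySem.Set (List Int)) : pvKey s = pvKey t ↔ s.Perm t := by
  unfold pvKey
  rw [pvSortedCongrInst rfl _ LinearOrder.toDecidableLT s _ false,
      pvSortedCongrInst rfl _ LinearOrder.toDecidableLT t _ false]
  exact PySem.List.sorted_id_eq_sorted_id_iff_perm s t

lemma pvSortedBlocks_eq_iff (xs ys : List (List (List Int))) :
    PySem.List.sorted xs (fun x => x) false = PySem.List.sorted ys (fun x => x) false ↔ xs.Perm ys := by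
  rw [pvSortedCongrInst rfl _ LinearOrder.toDecidableLT xs _ false,
      pvSortedCongrInst rfl _ LinearOrder.toDecidableLT ys _ false]
  exact PySem.List.sorted_id_eq_sorted_id_iff_perm xs ys

lemma pvSetEq_iff_key (s t : PySem.Set (List Int)) (hs : s.Nodup) (ht : t.Nodup) :
    PySem.Set.equal s t = true ↔ pvKey s = pvKey t := by
  rw [PySem.Set.equal_iff, pvKey_eq_iff]
  exact (List.perm_ext_iff_of_nodup hs ht).symm

-- if the canonical multisets agree, A's index/del loop succeeds and returns True
lemma pvRemoveLoop_true (be ba : List (PySem.Set (List Int)))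
    (hba : ∀ s ∈ ba, s.Nodup) (hbe : ∀ s ∈ be, s.Nodup)
    (hperm : (ba.map pvKey).Perm (be.map pvKey)) :
    pvRemoveLoop be ba = true := by
  induction be generalizing ba with
  | nil => simp [pvRemoveLoop]
  | cons b rest ih =>
    have hbnd : b.Nodup := hbe b (by simp)
    have hmem : pvKey b ∈ ba.map pvKey := hperm.symm.mem_iff.mp (by simp)
    rcases List.mem_map.mp hmem with ⟨s, hsmem, hskey⟩
    have hpred : PySem.Set.equal s b = true :=
      (pvSetEq_iff_key s b (hba s hsmem) hbnd).mpr hskey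
    have hne : pvIndexSetEq ba b ≠ none := by
      intro hn
      have := (List.findIdx?_eq_none_iff.mp hn) s hsmem
      simp [hpred] at this
    rcases hi : pvIndexSetEq ba b with _ | i
    · exact absurd hi hne
    rcases List.findIdx?_eq_some_iff_getElem.mp hi with ⟨hlt, hpi, _⟩
    have hkeyi : pvKey ba[i] = pvKey b :=
      (pvSetEq_iff_key ba[i] b (hba _ (List.getElem_mem hlt)) hbnd).mp (by simpa using hpi)
    have hpe : ((ba.eraseIdx i).map pvKey).Perm (rest.map pvKey) := by
      have h1 : (ba[i] :: ba.eraseIdx i).Perm ba := List.getElem_cons_eraseIdx_perm hlt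
      have h2 : (pvKey ba[i] :: (ba.eraseIdx i).map pvKey).Perm (ba.map pvKey) := by
        simpa using h1.map pvKey
      rw [hkeyi] at h2
      exact (h2.trans hperm).cons_inv
    have hne' : ∀ s' ∈ ba.eraseIdx i, s'.Nodup := fun s' hs' => hba s' (List.mem_of_mem_eraseIdx hs')
    have hbe' : ∀ s' ∈ rest, s'.Nodup := fun s' hs' => hbe s' (by simp [hs'])
    simp only [pvRemoveLoop, hi]
    exact ih (ba.eraseIdx i) hne' hbe' hpe

-- ===== VERDICT (by name: the statement is the Claim_ definition above) =====
theorem compare_caselists_py_spec : Claim_equal_compare_caselists_py := by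
  intro actual expected _ hpre
  unfold Spec_compare_caselists_py compare_caselists_py compare_caselists_py_alt
  by_cases h1 : actual.length = expected.length
  · simp only [h1, ne_eq, not_true_eq_false, if_false]
    have hlenmap : (pvToBlocksA actual).length = ((pvToBlocksA actual).map pvKey).length := by simp
    by_cases h2 : (pvToBlocksA actual).length = (pvToBlocksA expected).length
    · have hperm : ((pvToBlocksA actual).map pvKey).Perm ((pvToBlocksA expected).map pvKey) := by
        have := hpre h1 (by rw [pvPreBlocks_eq, pvPreBlocks_eq]; simp [h2])
        rwa [pvPreBlocks_eq, pvPreBlocks_eq] at this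
      have hA : pvRemoveLoop (pvToBlocksA expected) (pvToBlocksA actual) = true :=
        pvRemoveLoop_true _ _ (pvToBlocksA_nodup actual) (pvToBlocksA_nodup expected) hperm
      have hB : pvCanonB actual = pvCanonB expected := by
        rw [pvCanonB_eq, pvCanonB_eq]
        exact (pvSortedBlocks_eq_iff _ _).mpr hperm
      simp [h2, hA, hB]
    · have hB : pvCanonB actual ≠ pvCanonB expected := by
        intro h
        apply h2
        have := congrArg List.length h
        rw [pvCanonB_eq, pvCanonB_eq] at this
        simpa [PySem.List.length_sorted] using this
      simp [h2, hB]
  · simp [h1]
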